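-- pv_equiv track=rewrite | github.com/asrivathsan/miniBarcoder | correction_funcs.py | remove_ext_gaps
-- ===== SOURCE A (Python) =====
-- def remove_ext_gaps(seq):
-- 	startpos=0
-- 	endpos=0
-- 	for n,bp in enumerate(seq):
-- 		if bp!="-":
-- 			startpos=n
-- 			break
-- 	for n,bp in enumerate(seq[:: - 1]):
-- 		if bp !="-":
-- 			endpos = len(seq) - n
-- 			break
-- 	newseq=seq[startpos:endpos]
-- 	return newseq,startpos,endpos
-- ===== SOURCE B (Python) =====
-- def remove_ext_gaps(seq):
--     first = None
--     last = None
--     for n, bp in enumerate(seq):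
--         if bp != "-":
--             if first is None:
--                 first = n
--             last = n
--     startpos = first if first is not None else 0
--     endpos = last + 1 if last is not None else 0
--     return seq[startpos:endpos], startpos, endpos
-- ===== Notes on version B (the rewrite author's own statement) =====
-- stated objective: alternative
-- what changed: Replaces A's two directional early-break scans (the second over a reversed copy) with one forward pass maintaining first/last non-gap indices; no reversed copy is built.
import Mathlib
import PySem

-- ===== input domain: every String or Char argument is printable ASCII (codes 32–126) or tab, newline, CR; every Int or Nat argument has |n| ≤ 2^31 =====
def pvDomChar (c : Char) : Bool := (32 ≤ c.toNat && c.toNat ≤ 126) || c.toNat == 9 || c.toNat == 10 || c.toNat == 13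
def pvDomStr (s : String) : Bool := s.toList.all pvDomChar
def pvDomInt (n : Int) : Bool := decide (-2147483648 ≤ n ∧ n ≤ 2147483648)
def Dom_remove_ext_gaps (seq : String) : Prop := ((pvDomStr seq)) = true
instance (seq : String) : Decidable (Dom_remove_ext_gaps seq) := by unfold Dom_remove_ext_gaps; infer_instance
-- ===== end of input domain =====

-- B replaces A's two directional early-break scans (one over a reversed copy) with a single
-- forward pass maintaining first/last non-gap indices (objective: alternative decomposition).

-- ===== PORT A =====
-- first loop: 'for n,bp in enumerate(seq): if bp != "-": startpos = n; break' (startpos init 0)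
def pvLoopStart : List Char → Nat → Int
  | [], _ => 0
  | c :: cs, n => if c ≠ '-' then (n : Int) else pvLoopStart cs (n + 1)

-- second loop: 'for n,bp in enumerate(seq[::-1]): if bp != "-": endpos = len(seq) - n; break' (endpos init 0)
def pvLoopEnd (len : Nat) : List Char → Nat → Int
  | [], _ => 0
  | c :: cs, n => if c ≠ '-' then (len : Int) - (n : Int) else pvLoopEnd len cs (n + 1)

def remove_ext_gaps (seq : String) : String × Int × Int :=
  let startpos : Int := pvLoopStart seq.toList 0
  let endpos : Int := pvLoopEnd seq.toList.length seq.toList.reverse 0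
  let newseq : String := PySem.Str.slice seq (some startpos) (some endpos)
  (newseq, startpos, endpos)

-- ===== PORT B =====
-- single forward loop: (first, last) markers updated on each non-gap character
def pvScan : List Char → Nat → Option Nat → Option Nat → Option Nat × Option Nat
  | [], _, f, l => (f, l)
  | c :: cs, n, f, l =>
    if c ≠ '-' then
      pvScan cs (n + 1) (if f = none then some n else f) (some n)
    else
      pvScan cs (n + 1) f l

def remove_ext_gaps_alt (seq : String) : String × Int × Int :=
  let fl := pvScan seq.toList 0 none none
  let startpos : Int := match fl.1 with | some k => (k : Int) | none => 0
  let endpos : Int := match fl.2 with | some k => (k : Int) + 1 | none => 0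
  (PySem.Str.slice seq (some startpos) (some endpos), startpos, endpos)

-- ===== PRECONDITION & SPEC =====
def Spec_remove_ext_gaps (seq : String) (out : String × Int × Int) : Prop := out = remove_ext_gaps_alt seq
instance (seq : String) (out : String × Int × Int) : Decidable (Spec_remove_ext_gaps seq out) := by unfold Spec_remove_ext_gaps; infer_instance

-- ===== CLAIM (what is proved, stated in full; the proofs are below) =====
def Claim_equal_remove_ext_gaps : Prop := ∀ (seq : String), Dom_remove_ext_gaps seq → Spec_remove_ext_gaps seq (remove_ext_gaps seq)

-- ===== LEMMAS AND PROOFS =====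

theorem pvLoopStart_eq (cs : List Char) (n : Nat) :
    pvLoopStart cs n =
      match cs.findIdx? (fun c => c ≠ '-') with
      | some i => ((n + i : Nat) : Int)
      | none => 0 := by
  induction cs generalizing n with
  | nil => rfl
  | cons c cs ih =>
    by_cases h : c = '-'
    · subst h
      rw [pvLoopStart, if_neg (by simp), ih, List.findIdx?_cons]
      simp only [decide_not, decide_true, Bool.not_true]
      cases cs.findIdx? (fun c => !decide (c = '-')) <;> simp <;> push_cast <;> ring
    · rw [pvLoopStart, if_pos (by simpa using h), List.findIdx?_cons]
      simp [h]

theorem pvLoopEnd_eq (len : Nat) (rcs : List Char) (n : Nat) :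
    pvLoopEnd len rcs n =
      match rcs.findIdx? (fun c => c ≠ '-') with
      | some i => (len : Int) - ((n + i : Nat) : Int)
      | none => 0 := by
  induction rcs generalizing n with
  | nil => rfl
  | cons c cs ih =>
    by_cases h : c = '-'
    · subst h
      rw [pvLoopEnd, if_neg (by simp), ih, List.findIdx?_cons]
      simp only [decide_not, decide_true, Bool.not_true]
      cases cs.findIdx? (fun c => !decide (c = '-')) <;> simp <;> push_cast <;> ring
    · rw [pvLoopEnd, if_pos (by simpa using h), List.findIdx?_cons]
      simp [h]

theorem pvScan_fst_some (cs : List Char) (n k : Nat) (l : Option Nat) :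
    (pvScan cs n (some k) l).1 = some k := by
  induction cs generalizing n l with
  | nil => rfl
  | cons c cs ih =>
    rw [pvScan]
    split_ifs with h1 h2
    · exact absurd h2 (by simp)
    · exact ih _ _
    · exact ih _ _

theorem pvScan_fst_none (cs : List Char) (n : Nat) (l : Option Nat) :
    (pvScan cs n none l).1 = (cs.findIdx? (fun c => c ≠ '-')).map (n + ·) := by
  induction cs generalizing n l with
  | nil => rfl
  | cons c cs ih =>
    by_cases h : c = '-'
    · subst h
      rw [pvScan, if_neg (by simp), ih, List.findIdx?_cons]
      simp only [decide_not, decide_true, Bool.not_true]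
      cases cs.findIdx? (fun c => !decide (c = '-')) <;> simp <;> push_cast <;> ring
    · rw [pvScan, if_pos (by simpa using h), List.findIdx?_cons]
      simp [h, pvScan_fst_some]

-- spec of the last-non-gap index, recursive front-to-back
def lastNG : List Char → Option Nat
  | [] => none
  | c :: cs =>
    match lastNG cs with
    | some j => some (j + 1)
    | none => if c ≠ '-' then some 0 else none

theorem pvScan_snd (cs : List Char) (n : Nat) (f l : Option Nat) :
    (pvScan cs n f l).2 = match lastNG cs with | some j => some (n + j) | none => l := by
  induction cs generalizing n f l with
  | nil => rfl
  | cons c cs ih =>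
    rw [pvScan, lastNG]
    by_cases h : c = '-'
    · rw [if_neg (by simpa using h), ih]
      cases hc : lastNG cs with
      | some j => simp [h, Nat.add_assoc, Nat.add_comm 1]
      | none => simp [h]
    · rw [if_pos (by simpa using h), ih]
      cases hc : lastNG cs with
      | some j => simp [h, Nat.add_assoc, Nat.add_comm 1]
      | none => simp [h]

-- lastNG via findIdx? on the reversed list
theorem lastNG_eq_reverse (cs : List Char) :
    lastNG cs = (cs.reverse.findIdx? (fun c => c ≠ '-')).map (fun i => cs.length - 1 - i) := by
  induction cs with
  | nil => rfl
  | cons c cs ih =>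
    rw [lastNG, List.reverse_cons, List.findIdx?_append]
    cases hc : cs.reverse.findIdx? (fun c => c ≠ '-') with
    | some i =>
      have hi : i < cs.length := by
        have := (List.findIdx?_eq_some_iff_findIdx_eq.mp hc).1
        simpa using this
      rw [ih, hc]
      simp only [Option.map_some, Option.or_some, List.length_cons]
      congr 1
      beta_reduce
      omega
    | none =>
      rw [ih, hc]
      simp only [Option.map_none, List.findIdx?_cons, List.findIdx?_nil]
      by_cases h : c = '-' <;> simp [h, List.length_reverse]

-- ===== VERDICT (by name: the statement is the Claim_ definition above) =====
theorem remove_ext_gaps_spec : Claim_equal_remove_ext_gaps := by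
  intro seq _
  unfold Spec_remove_ext_gaps remove_ext_gaps remove_ext_gaps_alt
  simp only []
  rw [pvScan_fst_none, pvScan_snd, pvLoopStart_eq, pvLoopEnd_eq, lastNG_eq_reverse]
  simp only [ne_eq, decide_not]
  cases hf : seq.toList.findIdx? (fun c => !decide (c = '-')) with
  | none =>
    have hr : seq.toList.reverse.findIdx? (fun c => !decide (c = '-')) = none := by
      rw [List.findIdx?_eq_none_iff] at hf ⊢
      intro x hx; exact hf x (List.mem_reverse.mp hx)
    simp [hf, hr]
  | some i =>
    cases hr : seq.toList.reverse.findIdx? (fun c => !decide (c = '-')) with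
    | none =>
      exfalso
      rw [List.findIdx?_eq_none_iff] at hr
      have hx := List.findIdx?_eq_some_iff_findIdx_eq.mp hf
      have hmem : seq.toList[i]'(hx.1) ∈ seq.toList := List.getElem_mem _
      have := hr _ (List.mem_reverse.mpr hmem)
      have hp := List.findIdx_getElem (xs := seq.toList) (p := fun c => !decide (c = '-'))
        (w := by rw [hx.2]; exact hx.1)
      simp_all
    | some j =>
      have hj : j < seq.toList.length := by
        have := (List.findIdx?_eq_some_iff_findIdx_eq.mp hr).1
        simpa using this
      simp only [hf, Option.map_some]
      have he : ((seq.toList.length : Int) - ((0 + j : Nat) : Int)) =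
          ((0 + (seq.toList.length - 1 - j) : Nat) : Int) + 1 := by omega
      rw [he]
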